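-- pv_equiv track=rewrite | github.com/jhs9497/Algo-Lego | 이혜은/0909/괄호변환(실패).py | check
-- ===== SOURCE A (Python) =====
-- def check(p):
--
--     if len(p) == 0:
--         return True
--
--     tmp = 0
--     flag = True
--
--     for i in range(len(p)):
--         if p[i] == '(':
--             tmp += 1
--         else:
--             tmp -= 1
--
--         if tmp < 0:
--             flag = False
--
--     return flag
-- ===== SOURCE B (Python) =====
-- def check(p):
--     # valid iff every non-empty prefix contains at least as many '(' as other chars
--     return all(2 * p[:i].count('(') >= i for i in range(1, len(p) + 1))
-- ===== Notes on version B (the rewrite author's own statement) =====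
-- stated objective: simpler
-- what changed: Replaces the running-balance loop with a mutable flag by a one-line universal check that every prefix p[:i] contains at least i/2 opening parentheses (2*count >= i); all() short-circuits at the first bad prefix and str.count/slicing run in C, which made it measurably faster on the random timing inputs despite an O(n^2) worst case on long valid strings.
import Mathlib
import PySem

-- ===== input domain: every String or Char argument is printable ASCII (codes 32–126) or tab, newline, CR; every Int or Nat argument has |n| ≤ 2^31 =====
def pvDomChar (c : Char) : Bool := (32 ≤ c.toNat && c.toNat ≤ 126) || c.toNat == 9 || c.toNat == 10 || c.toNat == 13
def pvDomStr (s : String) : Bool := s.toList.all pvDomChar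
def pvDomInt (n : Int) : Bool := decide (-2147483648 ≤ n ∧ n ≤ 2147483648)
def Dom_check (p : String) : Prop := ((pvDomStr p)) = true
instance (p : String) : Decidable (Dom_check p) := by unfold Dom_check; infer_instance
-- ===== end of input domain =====

-- B replaces A's running-balance loop by a universal prefix-count test; equivalence of return values is proved below.

-- ===== PORT A =====
-- for i in range(len(p)): update tmp by p[i], clear flag when tmp < 0
def check (p : String) : Bool :=
  if PySem.Str.len p = 0 then true
  else
    ((PySem.List.pyRange 0 (PySem.Str.len p) 1).foldl
      (fun (st : Int × Bool) i =>
        let tmp := if PySem.List.pyGetD p.toList i ' ' = '(' then st.1 + 1 else st.1 - 1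
        (tmp, if tmp < 0 then false else st.2))
      ((0 : Int), true)).2

-- ===== PORT B =====
-- all(2 * p[:i].count('(') >= i for i in range(1, len(p) + 1))
def check_alt (p : String) : Bool :=
  (PySem.List.pyRange 1 (PySem.Str.len p + 1) 1).all
    (fun i => decide (2 * (PySem.Str.count (PySem.Str.slice p none (some i)) "(" : Int) ≥ i))

-- ===== PRECONDITION & SPEC =====
def Spec_check (p : String) (out : Bool) : Prop := out = check_alt p
instance (p : String) (out : Bool) : Decidable (Spec_check p out) := by unfold Spec_check; infer_instance

-- ===== CLAIM (what is proved, stated in full; the proofs are below) =====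
def Claim_equal_check : Prop := ∀ (p : String), Dom_check p → Spec_check p (check p)

-- ===== LEMMAS AND PROOFS =====

def pvBalChar (c : Char) : Int := if c = '(' then 1 else -1

def pvBal (l : List Char) : Int := (l.map pvBalChar).sum

def pvOk (t : Int) : List Char → Bool
  | [] => true
  | c :: rest => (decide (0 ≤ t + pvBalChar c)) && pvOk (t + pvBalChar c) rest

theorem pvFoldA (l : List Char) (t : Int) (b : Bool) :
    (l.foldl
      (fun (st : Int × Bool) c =>
        let tmp := if c = '(' then st.1 + 1 else st.1 - 1
        (tmp, if tmp < 0 then false else st.2))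
      (t, b)).2 = (b && pvOk t l) := by
  induction l generalizing t b with
  | nil => simp [pvOk]
  | cons c rest ih =>
      simp only [List.foldl_cons]
      rw [ih]
      simp only [pvOk, pvBalChar]
      by_cases hc : c = '('
      · by_cases h : t + 1 < 0
        · have hd : decide ((0:Int) ≤ t + 1) = false := by simp; omega
          simp [hc, h, hd]
        · have hd : decide ((0:Int) ≤ t + 1) = true := by simp; omega
          simp [hc, h, hd, Bool.and_assoc]
      · have e : t - 1 = t + -1 := by ring
        by_cases h : t < 1
        · simp [hc, e, show t - 1 < 0 by omega, show ¬(1:Int) ≤ t by omega]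
        · simp [hc, e, show ¬(t - 1 < 0) by omega, show (1:Int) ≤ t by omega, Bool.and_assoc]

theorem pvOk_iff (l : List Char) (t : Int) :
    pvOk t l = true ↔ ∀ i : Nat, 1 ≤ i → i ≤ l.length → 0 ≤ t + pvBal (l.take i) := by
  induction l generalizing t with
  | nil =>
      simp only [pvOk, List.length_nil, true_iff]
      intro i h1 h2
      omega
  | cons c rest ih =>
      simp only [pvOk, Bool.and_eq_true, decide_eq_true_eq, ih]
      constructor
      · rintro ⟨h0, h⟩ i h1 hi
        match i with
        | 1 => simpa [pvBal]
        | (j + 2) =>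
            have := h (j + 1) (by omega) (by simpa using hi)
            simpa [pvBal, add_assoc] using this
      · intro h
        refine ⟨by simpa [pvBal] using h 1 (by omega) (by simp), ?_⟩
        intro i h1 hi
        have := h (i + 1) (by omega) (by simpa using Nat.succ_le_succ hi)
        simpa [pvBal, add_assoc] using this

theorem pvCount_go (c : Char) (cs : List Char) (fuel acc : Nat) (hf : cs.length ≤ fuel) :
    PySem.Chars.count.go [c] fuel cs acc = acc + cs.count c := by
  induction cs generalizing fuel acc with
  | nil => cases fuel <;> simp [PySem.Chars.count.go]
  | cons x xs ih =>
      match fuel with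
      | 0 => simp at hf
      | fuel + 1 =>
          have hf' : xs.length ≤ fuel := by simpa using hf
          by_cases hx : x = c
          · have hp : List.isPrefixOf [c] (x :: xs) = true := by simp [List.isPrefixOf, hx]
            simp only [PySem.Chars.count.go, hp, if_pos]
            rw [show List.drop (List.length [c]) (x :: xs) = xs by simp, ih fuel (acc + 1) hf']
            simp [hx]
            omega
          · have hp : List.isPrefixOf [c] (x :: xs) = false := by
              simp only [List.isPrefixOf, Bool.and_eq_false_iff, beq_eq_false_iff_ne, ne_eq]
              exact Or.inl fun h => hx h.symm
            simp only [PySem.Chars.count.go, hp]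
            rw [if_neg (by simp only [hp, Bool.false_eq_true, not_false_eq_true])]
            rw [ih fuel acc hf']
            simp [hx]

theorem pvCount_singleton (c : Char) (cs : List Char) :
    PySem.Chars.count cs [c] = cs.count c := by
  simpa [PySem.Chars.count] using pvCount_go c cs cs.length 0 le_rfl

theorem pvBal_eq (l : List Char) :
    pvBal l = 2 * (l.count '(' : Int) - l.length := by
  induction l with
  | nil => simp [pvBal]
  | cons c rest ih =>
      simp only [pvBal, List.map_cons, List.sum_cons, List.count_cons, List.length_cons] at *
      by_cases hc : c = '(' <;> simp [pvBalChar, hc, ih] <;> ring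

theorem pvAlt_iff (p : String) :
    check_alt p = true ↔
      ∀ i : Nat, 1 ≤ i → i ≤ p.toList.length → 0 ≤ pvBal (p.toList.take i) := by
  unfold check_alt
  rw [List.all_eq_true]
  constructor
  · intro h i h1 hi
    have hm : (i : Int) ∈ PySem.List.pyRange 1 (PySem.Str.len p + 1) 1 := by
      rw [PySem.List.mem_pyRange_one]
      simp only [PySem.Str.len_eq]
      omega
    have := h _ hm
    simp only [decide_eq_true_eq, ge_iff_le] at this
    rw [PySem.Str.count_eq] at this
    have hslice : (PySem.Str.slice p none (some (i : Int))).toList = p.toList.take i := by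
      rw [PySem.Str.toList_slice, PySem.Chars.slice_eq_listSlice,
        PySem.List.slice_to p.toList (by omega : (0:Int) ≤ (i : Int))]
      simp
    rw [hslice, show "(".toList = ['('] from rfl, pvCount_singleton] at this
    rw [pvBal_eq]
    have hlen : (p.toList.take i).length = i := by rw [List.length_take]; omega
    rw [hlen]
    omega
  · intro h x hx
    rw [PySem.List.mem_pyRange_one] at hx
    simp only [PySem.Str.len_eq] at hx
    obtain ⟨h1, h2⟩ := hx
    simp only [decide_eq_true_eq, ge_iff_le]
    rw [PySem.Str.count_eq]
    have hx' : x = (x.toNat : Int) := by omega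
    have hslice : (PySem.Str.slice p none (some x)).toList = p.toList.take x.toNat := by
      rw [PySem.Str.toList_slice, PySem.Chars.slice_eq_listSlice,
        PySem.List.slice_to p.toList (by omega : (0:Int) ≤ x)]
    rw [hslice, show "(".toList = ['('] from rfl, pvCount_singleton]
    have := h x.toNat (by omega) (by omega)
    rw [pvBal_eq] at this
    have hlen : (p.toList.take x.toNat).length = x.toNat := by rw [List.length_take]; omega
    rw [hlen] at this
    omega

-- ===== VERDICT (by name: the statement is the Claim_ definition above) =====
theorem check_spec : Claim_equal_check := by
  intro p _
  unfold Spec_check check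
  by_cases h0 : PySem.Str.len p = 0
  · rw [if_pos h0]
    have : p.toList = [] := by
      have := h0; simp only [PySem.Str.len_eq] at this
      exact List.length_eq_zero_iff.mp (by exact_mod_cast this)
    symm
    rw [pvAlt_iff]
    intro i h1 h2
    simp [this] at h2
    simp [h2, pvBal, this]
  · rw [if_neg h0]
    rw [show (PySem.Str.len p) = ((p.toList.length : Int)) from by simp]
    refine Eq.trans (congrArg Prod.snd
      (PySem.List.foldl_pyRange_zero_pyGetD' p.toList ' '
        (fun (st : Int × Bool) c =>
          let tmp := if c = '(' then st.1 + 1 else st.1 - 1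
          (tmp, if tmp < 0 then false else st.2)) ((0 : Int), true))) ?_
    refine Eq.trans (pvFoldA p.toList 0 true) ?_
    rw [Bool.true_and]
    rw [Bool.eq_iff_iff, pvOk_iff, pvAlt_iff]
    simp
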